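-- pv_equiv track=rewrite | github.com/henny-kim/parca_simplified | clinical_data_extractor.py | _parse_abstracts
-- ===== SOURCE A (Python) =====
-- from typing import Dict, List, Optional
--
-- def _parse_abstracts(text: str) -> List[Dict]:
--     """Parse PubMed abstract text into structured data"""
--     abstracts = []
--     current_abstract = {}
--     lines = text.split('\n')
--
--     for line in lines:
--         if line.startswith('PMID:'):
--             if current_abstract:
--                 abstracts.append(current_abstract)
--             current_abstract = {'pmid': line.split(':')[1].strip()}
--         elif line.startswith('DOI:'):
--             current_abstract['doi'] = line.split(':')[1].strip()
--         elif line.startswith('Title:'):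
--             current_abstract['title'] = line.split(':', 1)[1].strip()
--         elif line.startswith('Author information:'):
--             current_abstract['authors'] = line.split(':', 1)[1].strip()
--         elif line.startswith('ABSTRACT:'):
--             current_abstract['abstract'] = line.split(':', 1)[1].strip()
--         elif current_abstract.get('abstract') and line.strip():
--             current_abstract['abstract'] += ' ' + line.strip()
--
--     if current_abstract:
--         abstracts.append(current_abstract)
--
--     return abstracts
-- ===== SOURCE B (Python) =====
-- from typing import Dict, List, Optional
--
-- def _segments(lines):
--     """Split lines into groups: a leading pre-PMID group, then one group per 'PMID:' line."""
--     groups = [[]]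
--     for line in lines:
--         if line.startswith('PMID:'):
--             groups.append([])
--         groups[-1].append(line)
--     return groups
--
-- def _parse_group(lines):
--     d = {}
--     for line in lines:
--         if line.startswith('PMID:'):
--             d['pmid'] = line.split(':')[1].strip()
--         elif line.startswith('DOI:'):
--             d['doi'] = line.split(':')[1].strip()
--         elif line.startswith('Title:'):
--             d['title'] = line.split(':', 1)[1].strip()
--         elif line.startswith('Author information:'):
--             d['authors'] = line.split(':', 1)[1].strip()
--         elif line.startswith('ABSTRACT:'):
--             d['abstract'] = line.split(':', 1)[1].strip()
--         elif d.get('abstract') and line.strip():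
--             d['abstract'] += ' ' + line.strip()
--     return d
--
-- def _parse_abstracts(text: str) -> List[Dict]:
--     """Parse PubMed abstract text into structured data (segment-then-parse)."""
--     records = [_parse_group(g) for g in _segments(text.split('\n'))]
--     return [r for r in records if r]
-- ===== Notes on version B (the rewrite author's own statement) =====
-- stated objective: alternative
-- what changed: Replaces A's single streaming pass that flushes the accumulator dict at each PMID line with a two-pass segment-then-parse structure: first split the lines into record groups at PMID lines (keeping a leading pre-PMID group), then parse each group independently with the same field rules and keep the non-empty dicts.
import Mathlib
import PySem

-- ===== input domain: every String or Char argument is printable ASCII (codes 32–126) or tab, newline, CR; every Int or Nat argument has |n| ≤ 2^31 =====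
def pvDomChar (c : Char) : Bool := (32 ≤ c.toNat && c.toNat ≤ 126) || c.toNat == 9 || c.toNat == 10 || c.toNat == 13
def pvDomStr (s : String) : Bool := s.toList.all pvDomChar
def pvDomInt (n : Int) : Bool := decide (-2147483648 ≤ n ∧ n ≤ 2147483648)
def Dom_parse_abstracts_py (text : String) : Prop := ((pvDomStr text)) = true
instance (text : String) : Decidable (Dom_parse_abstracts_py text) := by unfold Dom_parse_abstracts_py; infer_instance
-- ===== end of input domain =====

-- B replaces A's single flush-on-PMID streaming pass by an explicit segment-then-parse two-pass
-- decomposition (objective: alternative); return values are proved equal on the whole domain.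

-- shared line-level helpers (the identical Python expressions occur in both sources)
-- line.split(':')[1].strip()   (the index is in range whenever the guarding startswith holds)
def pvColonAll (line : String) : String :=
  PySem.Str.strip (PySem.List.pyGetD ((PySem.Str.split? line ":").getD []) 1 "")

-- line.split(':', 1)[1].strip()
def pvColonMax (line : String) : String :=
  PySem.Str.strip (PySem.List.pyGetD ((PySem.Str.splitMax? line ":" 1).getD []) 1 "")

-- current_abstract.get('abstract') and line.strip()   (Python truthiness of both strings)
def pvAbsGuard (cur : PySem.Dict String String) (line : String) : Bool :=
  (match cur.get? "abstract" with
   | some a => !(a == "")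
   | none => false) && !(PySem.Str.strip line == "")

-- current_abstract['abstract'] + ' ' + line.strip()
def pvAbsAppend (a line : String) : String :=
  PySem.Str.join "" [a, " ", PySem.Str.strip line]

-- the DOI/Title/Author information/ABSTRACT/continuation elif chain (identical in both sources)
def pvFieldStep (cur : PySem.Dict String String) (line : String) : PySem.Dict String String :=
  if PySem.Str.startswith line "DOI:" then cur.insert "doi" (pvColonAll line)
  else if PySem.Str.startswith line "Title:" then cur.insert "title" (pvColonMax line)
  else if PySem.Str.startswith line "Author information:" then cur.insert "authors" (pvColonMax line)
  else if PySem.Str.startswith line "ABSTRACT:" then cur.insert "abstract" (pvColonMax line)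
  else if pvAbsGuard cur line then
    cur.insert "abstract" (pvAbsAppend ((cur.get? "abstract").getD "") line)
  else cur

-- ===== PORT A =====
-- A's loop body: flush current_abstract on a 'PMID:' line, else update fields in place
def pvStepA (st : List (PySem.Dict String String) × PySem.Dict String String) (line : String) :
    List (PySem.Dict String String) × PySem.Dict String String :=
  if PySem.Str.startswith line "PMID:" then
    ((if st.2.items.isEmpty then st.1 else st.1 ++ [st.2]),
     PySem.Dict.ofList [("pmid", pvColonAll line)])
  else (st.1, pvFieldStep st.2 line)

def parse_abstracts_py (text : String) : List (List (String × String)) :=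
  let lines := (PySem.Str.split? text "\n").getD []
  let st := lines.foldl pvStepA ([], PySem.Dict.empty)
  let abstracts := if st.2.items.isEmpty then st.1 else st.1 ++ [st.2]
  abstracts.map (·.items)

-- ===== PORT B =====
-- Source B _segments: one group before the first PMID line, then a group starting at every PMID line
def pvSegStep (st : List (List String) × List String) (line : String) :
    List (List String) × List String :=
  if PySem.Str.startswith line "PMID:" then (st.1 ++ [st.2], [line])
  else (st.1, st.2 ++ [line])

-- Source B _parse_group loop body
def pvStepB (cur : PySem.Dict String String) (line : String) : PySem.Dict String String :=
  if PySem.Str.startswith line "PMID:" then cur.insert "pmid" (pvColonAll line)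
  else pvFieldStep cur line

def parse_abstracts_py_alt (text : String) : List (List (String × String)) :=
  let lines := (PySem.Str.split? text "\n").getD []
  let st := lines.foldl pvSegStep ([], [])
  let groups := st.1 ++ [st.2]
  let records := groups.map (fun g => g.foldl pvStepB PySem.Dict.empty)
  (records.filter (fun d => !d.items.isEmpty)).map (·.items)

-- ===== PRECONDITION & SPEC =====
def Spec_parse_abstracts_py (text : String) (out : List (List (String × String))) : Prop := out = parse_abstracts_py_alt text
instance (text : String) (out : List (List (String × String))) : Decidable (Spec_parse_abstracts_py text out) := by unfold Spec_parse_abstracts_py; infer_instance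

-- ===== CLAIM (what is proved, stated in full; the proofs are below) =====
def Claim_equal_parse_abstracts_py : Prop := ∀ (text : String), Dom_parse_abstracts_py text → Spec_parse_abstracts_py text (parse_abstracts_py text)

-- ===== LEMMAS AND PROOFS =====

-- right-recursive view of the segmentation: (head group, PMID-led tail groups)
def pvSegR : List String → List String × List (List String)
  | [] => ([], [])
  | l :: ls =>
    let p := pvSegR ls
    if PySem.Str.startswith l "PMID:" then ([], (l :: p.1) :: p.2) else (l :: p.1, p.2)

theorem pvSeg_loop (ls : List String) (done : List (List String)) (cur : List String) :
    (ls.foldl pvSegStep (done, cur)).1 ++ [(ls.foldl pvSegStep (done, cur)).2]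
      = done ++ (cur ++ (pvSegR ls).1) :: (pvSegR ls).2 := by
  induction ls generalizing done cur with
  | nil => simp [pvSegR]
  | cons l ls ih =>
    by_cases h : PySem.Str.startswith l "PMID:"
    all_goals simp at h
    · simp [pvSegStep, pvSegR, h, ih]
    · simp [pvSegStep, pvSegR, h, ih]

-- emit of A's flush
def pvEmit (d : PySem.Dict String String) : List (PySem.Dict String String) :=
  if d.items.isEmpty then [] else [d]

theorem pvFilter_cons (d : PySem.Dict String String) (rest : List (PySem.Dict String String)) :
    List.filter (fun d => !d.items.isEmpty) (d :: rest)
      = pvEmit d ++ List.filter (fun d => !d.items.isEmpty) rest := by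
  by_cases hd : d.items.isEmpty <;> simp [List.filter, pvEmit, hd]

theorem pvMain (ls : List String) (acc : List (PySem.Dict String String))
    (cur : PySem.Dict String String) :
    (ls.foldl pvStepA (acc, cur)).1 ++ pvEmit (ls.foldl pvStepA (acc, cur)).2
      = acc ++ (((pvSegR ls).1.foldl pvStepB cur)
          :: (pvSegR ls).2.map (fun g => g.foldl pvStepB PySem.Dict.empty)).filter
            (fun d => !d.items.isEmpty) := by
  induction ls generalizing acc cur with
  | nil => simp [pvSegR, pvFilter_cons]
  | cons l ls ih =>
    by_cases h : PySem.Str.startswith l "PMID:"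
    all_goals simp at h
    · have e1 : pvStepA (acc, cur) l
          = (acc ++ pvEmit cur, PySem.Dict.ofList [("pmid", pvColonAll l)]) := by
        unfold pvStepA pvEmit
        by_cases hc : cur.items.isEmpty <;> simp [h, hc]
      have hd : (PySem.Dict.empty : PySem.Dict String String).insert "pmid" (pvColonAll l)
          = PySem.Dict.ofList [("pmid", pvColonAll l)] := rfl
      rw [List.foldl_cons, e1, ih]
      simp [pvSegR, pvStepB, h, pvFilter_cons, hd]
    · have e1 : pvStepA (acc, cur) l = (acc, pvFieldStep cur l) := by
        unfold pvStepA; simp [h]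
      rw [List.foldl_cons, e1, ih]
      simp [pvSegR, pvStepB, h]

-- ===== VERDICT (by name: the statement is the Claim_ definition above) =====
theorem parse_abstracts_py_spec : Claim_equal_parse_abstracts_py := by
  intro text _
  unfold Spec_parse_abstracts_py parse_abstracts_py parse_abstracts_py_alt
  have hA : ∀ st : List (PySem.Dict String String) × PySem.Dict String String,
      (if st.2.items.isEmpty then st.1 else st.1 ++ [st.2]) = st.1 ++ pvEmit st.2 := by
    intro st; unfold pvEmit; by_cases hc : st.2.items.isEmpty <;> simp [hc]
  simp only [hA]
  rw [pvMain, pvSeg_loop]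
  simp
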